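-- pv_equiv track=rewrite | github.com/matthewhjohnsonund/HW3-JohnsonM-PraskaC-ParrishJ | logic.py | matching_paren
-- ===== SOURCE A (Python) =====
-- def matching_paren(s):
--     """Return True if the first '(' matches the last ')'"""
--     depth = 0
--     for i, c in enumerate(s):
--         if c == '(':
--             depth += 1
--         elif c == ')':
--             depth -= 1
--             if depth == 0 and i < len(s) - 1:
--                 return False
--     return depth == 0
-- ===== SOURCE B (Python) =====
-- def matching_paren(s):
--     """Return True if the first '(' matches the last ')'"""
--     # Pass 1: prefix-balance table.
--     bal = []
--     d = 0
--     for c in s: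
--         d += 1 if c == '(' else (-1 if c == ')' else 0)
--         bal.append(d)
--     # Pass 2: a ')' that closes to balance 0 before the last position fails.
--     n = len(s)
--     for i in range(n):
--         if s[i] == ')' and bal[i] == 0 and i < n - 1:
--             return False
--     return n == 0 or bal[-1] == 0
-- ===== Notes on version B (the rewrite author's own statement) =====
-- stated objective: alternative
-- what changed: Replaces the single early-exit stateful loop by a two-pass decomposition: first build a prefix-balance table, then a separate scan of string+table that rejects a ')' reaching balance 0 before the last position.
import Mathlib
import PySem

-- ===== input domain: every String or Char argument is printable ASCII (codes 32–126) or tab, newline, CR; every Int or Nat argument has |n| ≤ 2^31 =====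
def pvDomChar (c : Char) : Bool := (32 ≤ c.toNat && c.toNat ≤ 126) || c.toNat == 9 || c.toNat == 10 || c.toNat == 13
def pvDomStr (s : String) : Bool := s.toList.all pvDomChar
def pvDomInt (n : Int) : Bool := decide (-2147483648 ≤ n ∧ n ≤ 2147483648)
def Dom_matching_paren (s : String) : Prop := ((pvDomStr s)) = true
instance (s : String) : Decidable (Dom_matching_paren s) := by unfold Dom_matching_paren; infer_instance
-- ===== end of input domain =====

-- B replaces A's single early-exit loop by a prefix-balance table plus a separate checking scan (alternative decomposition, same cost).


-- ===== PORT A =====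
-- A's for-loop with early return, as structural recursion over the characters
-- carrying `depth`; `i < len(s) - 1` is exactly `rest ≠ []`.
def mpLoopA : List Char → Int → Bool
  | [], depth => depth == 0
  | c :: rest, depth =>
    if c = '(' then mpLoopA rest (depth + 1)
    else if c = ')' then
      if depth - 1 == 0 && !(rest.isEmpty) then false
      else mpLoopA rest (depth - 1)
    else mpLoopA rest depth

def matching_paren (s : String) : Bool := mpLoopA s.toList 0

-- ===== PORT B =====
-- Pass 1 of Source B: the prefix-balance table (bal).
def mpDelta (c : Char) : Int := if c = '(' then 1 else if c = ')' then -1 else 0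

def mpBal : List Char → Int → List Int
  | [], _ => []
  | c :: rest, d => (d + mpDelta c) :: mpBal rest (d + mpDelta c)

-- Pass 2 of Source B: walk the string together with bal; `i < n - 1` is `cs ≠ []`.
def mpScanB : List Char → List Int → Bool
  | c :: cs, b :: bs =>
    if c = ')' && b == 0 && !(cs.isEmpty) then false else mpScanB cs bs
  | _, _ => true

-- `n == 0 or bal[-1] == 0` (bal[-1] only read when nonempty, as in Python's or).
def matching_paren_alt (s : String) : Bool :=
  let cs := s.toList
  let bal := mpBal cs 0
  if mpScanB cs bal then (cs.isEmpty || (bal.getLastD 0 == 0)) else false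

-- ===== PRECONDITION & SPEC =====
def Spec_matching_paren (s : String) (out : Bool) : Prop := out = matching_paren_alt s
instance (s : String) (out : Bool) : Decidable (Spec_matching_paren s out) := by unfold Spec_matching_paren; infer_instance

-- ===== CLAIM (what is proved, stated in full; the proofs are below) =====
def Claim_equal_matching_paren : Prop := ∀ (s : String), Dom_matching_paren s → Spec_matching_paren s (matching_paren s)

-- ===== LEMMAS AND PROOFS =====
theorem mpLast : ∀ (l : List Int) (a d : Int), (a :: l).getLast?.getD d = l.getLast?.getD a
  | [], _, _ => rfl
  | b :: l, a, d => by
    rw [List.getLast?_cons_cons, mpLast l b d, mpLast l b a]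

theorem mpLoopA_eq (cs : List Char) : ∀ d : Int,
    mpLoopA cs d = (mpScanB cs (mpBal cs d) && ((mpBal cs d).getLastD d == 0)) := by
  induction cs with
  | nil => intro d; simp [mpLoopA, mpScanB, mpBal]
  | cons c rest ih =>
    intro d
    by_cases hop : c = '('
    · simp [mpLoopA, mpScanB, mpBal, mpDelta, hop, mpLast, ih]
    · by_cases hcl : c = ')'
      · by_cases hstop : (d - 1 == 0 && !(rest.isEmpty)) = true
        · simp at hstop
          simp [mpLoopA, mpScanB, mpBal, mpDelta, hop, hcl, hstop.1, hstop.2]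
          intro h; omega
        · simp at hstop
          have e : d + -1 = d - 1 := by ring
          by_cases hr : rest = [] <;> by_cases hd : d - 1 = 0 <;>
            simp_all [mpLoopA, mpScanB, mpBal, mpDelta, hcl, mpLast, e, ih]
      · simp [mpLoopA, mpScanB, mpBal, mpDelta, hop, hcl, mpLast, ih]

-- ===== VERDICT (by name: the statement is the Claim_ definition above) =====
theorem matching_paren_spec : Claim_equal_matching_paren := by
  intro s _
  unfold Spec_matching_paren matching_paren matching_paren_alt
  rw [mpLoopA_eq]
  cases h : s.toList with
  | nil => simp [mpBal, mpScanB]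
  | cons c rest => simp [mpBal]
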